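-- pv_equiv track=rewrite | github.com/Sh1rsh1n/python_gb | HomeWork/Seminar_3/task_5.py | fib_negative
-- ===== SOURCE A (Python) =====
-- def fib_negative(num: int):
--     x = y = 1
--     num_list = [0]
--     for i in range(num):
--         num_list.append(x)
--         num_list.insert(0, x * (-1) ** i)
--         x, y = y, x + y
--     return num_list
-- ===== SOURCE B (Python) =====
-- def fib_negative(num: int):
--     def fib(n):
--         # fast doubling: returns (F(n), F(n+1)) with F(0)=0, F(1)=1
--         if n == 0:
--             return (0, 1)
--         a, b = fib(n >> 1)
--         c = a * (2 * b - a)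
--         d = a * a + b * b
--         if n & 1:
--             return (d, c + d)
--         return (c, d)
--
--     def fib_at(k):
--         # F(k) for any integer k, via F(-n) = (-1)**(n+1) * F(n)
--         if k >= 0:
--             return fib(k)[0]
--         m = -k
--         return fib(m)[0] * (-1) ** (m + 1)
--
--     return [fib_at(k) for k in range(-num, num + 1)]
-- ===== Notes on version B (the rewrite author's own statement) =====
-- stated objective: alternative
-- what changed: B computes each term independently with a fast-doubling Fibonacci function and the negative-index identity F(-n)=(-1)^(n+1)F(n), mapping it over range(-num, num+1), instead of A's single loop that grows one list by append plus insert(0); Pre_ excludes negative num, a degenerate count on which A's [0] and B's [] are both defensible.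
-- outside the precondition, e.g. on fib_negative(-1): A returns [0], B returns []
import Mathlib
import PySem

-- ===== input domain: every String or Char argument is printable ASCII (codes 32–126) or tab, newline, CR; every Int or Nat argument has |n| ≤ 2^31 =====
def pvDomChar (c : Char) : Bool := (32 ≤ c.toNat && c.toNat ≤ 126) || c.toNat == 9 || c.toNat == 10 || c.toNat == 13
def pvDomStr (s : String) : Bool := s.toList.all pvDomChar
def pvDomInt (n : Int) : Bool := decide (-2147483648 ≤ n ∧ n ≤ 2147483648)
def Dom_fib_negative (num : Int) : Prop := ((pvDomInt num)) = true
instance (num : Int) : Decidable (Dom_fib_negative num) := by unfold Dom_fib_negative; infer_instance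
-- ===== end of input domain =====

-- B replaces A's grow-one-list loop by an index formula: each term F(k) for
-- k in range(-num, num+1) is computed independently by fast doubling, with
-- F(-n) = (-1)^(n+1) F(n) for the negative side (objective: alternative algorithm).

-- ===== PORT A =====
-- (-1) ** i : i ranges over range(num), so i ≥ 0; the exponent is taken as i.toNat (exact there)
def fib_negative (num : Int) : List Int :=
  ((PySem.List.pyRange 0 num 1).foldl
    (fun (st : Int × Int × List Int) (i : Int) =>
      (st.2.1, st.1 + st.2.1,
        PySem.List.insert (st.2.2 ++ [st.1]) 0 (st.1 * (-1) ^ i.toNat)))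
    (1, 1, [0])).2.2

-- ===== PORT B =====
-- fib(n) of Source B: fast doubling; its argument is always a nonnegative int, so it is
-- transcribed on Nat (n >> 1 = n / 2, n & 1 = n % 2; exact for nonnegative n)
def fibFD (n : Nat) : Int × Int :=
  if h : n = 0 then (0, 1)
  else
    let p := fibFD (n / 2)
    let c := p.1 * (2 * p.2 - p.1)
    let d := p.1 * p.1 + p.2 * p.2
    if n % 2 = 1 then (d, c + d) else (c, d)
termination_by n
decreasing_by omega

-- fib_at(k) of Source B: (-k).toNat is exact since the branch has k < 0
def fibAt (k : Int) : Int :=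
  if 0 ≤ k then (fibFD k.toNat).1
  else (fibFD (-k).toNat).1 * (-1) ^ ((-k).toNat + 1)

def fib_negative_alt (num : Int) : List Int :=
  (PySem.List.pyRange (-num) (num + 1) 1).map fibAt

-- ===== PRECONDITION & SPEC =====
-- Pre_ excludes negative num, a degenerate count on which A's [0] and B's [] are
-- both defensible readings of an unspecified corner.
def Pre_fib_negative (num : Int) : Prop := 0 ≤ num
instance (num : Int) : Decidable (Pre_fib_negative num) := by unfold Pre_fib_negative; infer_instance
def pvWitness_fib_negative : Int := (3)

def Spec_fib_negative (num : Int) (out : List Int) : Prop := out = fib_negative_alt num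
instance (num : Int) (out : List Int) : Decidable (Spec_fib_negative num out) := by unfold Spec_fib_negative; infer_instance

-- ===== CLAIM (what is proved, stated in full; the proofs are below) =====
def Claim_equal_fib_negative : Prop := ∀ (num : Int), Dom_fib_negative num → Pre_fib_negative num → Spec_fib_negative num (fib_negative num)

-- ===== LEMMAS AND PROOFS =====

-- (x, y) of A after n loop iterations
def fibP : Nat → Int × Int
  | 0 => (1, 1)
  | n + 1 => ((fibP n).2, (fibP n).1 + (fibP n).2)

-- the positive half of A's list after n iterations
def posL : Nat → List Int
  | 0 => []
  | n + 1 => posL n ++ [(fibP n).1]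

-- the negative half of A's list after n iterations (built front-first, as A inserts at 0)
def negL : Nat → List Int
  | 0 => []
  | n + 1 => ((fibP n).1 * (-1) ^ n) :: negL n

theorem foldA_range (n : Nat) :
    (List.range n).foldl
      (fun (st : Int × Int × List Int) (k : Nat) =>
        (st.2.1, st.1 + st.2.1,
          PySem.List.insert (st.2.2 ++ [st.1]) 0 (st.1 * (-1) ^ k)))
      (1, 1, [0])
      = ((fibP n).1, (fibP n).2, negL n ++ 0 :: posL n) := by
  induction n with
  | zero => rfl
  | succ n ih =>
      rw [List.range_succ, List.foldl_append, ih]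
      simp [fibP, negL, posL, PySem.List.insert_zero]

theorem fibP_eq (n : Nat) :
    fibP n = ((Nat.fib (n + 1) : Int), (Nat.fib (n + 2) : Int)) := by
  induction n with
  | zero => simp [fibP]
  | succ n ih =>
      rw [fibP, ih]
      have : Nat.fib (n + 3) = Nat.fib (n + 1) + Nat.fib (n + 2) := Nat.fib_add_two
      simp [this]

theorem int_fib_two_mul (m : Nat) :
    (Nat.fib (2 * m) : Int) = Nat.fib m * (2 * Nat.fib (m + 1) - Nat.fib m) := by
  have h := Nat.fib_two_mul m
  have hle : Nat.fib m ≤ 2 * Nat.fib (m + 1) :=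
    le_trans Nat.fib_le_fib_succ (by omega)
  zify [hle] at h
  exact h

theorem int_fib_two_mul_add_one (m : Nat) :
    (Nat.fib (2 * m + 1) : Int) = Nat.fib m * Nat.fib m + Nat.fib (m + 1) * Nat.fib (m + 1) := by
  have h := Nat.fib_two_mul_add_one m
  zify at h
  rw [h]; ring

theorem fibFD_eq (n : Nat) : fibFD n = ((Nat.fib n : Int), (Nat.fib (n + 1) : Int)) := by
  induction n using Nat.strong_induction_on with
  | _ n ih =>
    by_cases h : n = 0
    · subst h; rw [fibFD]; simp
    · rw [fibFD]; simp only [h, dite_false]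
      have hlt : n / 2 < n := by omega
      rw [ih (n / 2) hlt]
      rcases Nat.even_or_odd n with he | ho
      · obtain ⟨m, hm⟩ := he
        have hn : n = 2 * m := by omega
        subst hn
        have hd : 2 * m / 2 = m := by omega
        rw [hd, if_neg (by omega)]
        refine Prod.ext ?_ ?_
        · simpa using (int_fib_two_mul m).symm
        · simpa using (int_fib_two_mul_add_one m).symm
      · obtain ⟨m, hm⟩ := ho
        subst hm
        have hdiv : (2 * m + 1) / 2 = m := by omega
        rw [hdiv, if_pos (by omega)]
        refine Prod.ext ?_ ?_
        · simpa using (int_fib_two_mul_add_one m).symm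
        · have h2 : ((Nat.fib (2 * m + 2) : Int))
              = Nat.fib (2 * m) + Nat.fib (2 * m + 1) := by
            have := @Nat.fib_add_two (2 * m); zify at this; exact this
          simp only [h2, int_fib_two_mul m, int_fib_two_mul_add_one m]

theorem posL_eq (n : Nat) :
    posL n = (List.range n).map (fun i => (Nat.fib (i + 1) : Int)) := by
  induction n with
  | zero => rfl
  | succ n ih =>
      rw [posL, ih, List.range_succ, List.map_append, fibP_eq]
      simp

theorem negL_eq (n : Nat) :
    negL n = (List.range n).map (fun k => (Nat.fib (n - k) : Int) * (-1) ^ (n - k - 1)) := by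
  induction n with
  | zero => rfl
  | succ n ih =>
      rw [negL, ih, List.range_succ_eq_map]
      simp only [List.map_cons, List.map_map]
      congr 1
      · simp [fibP_eq]
      · apply List.map_congr_left
        intro a _
        simp [Nat.succ_sub_succ]

-- A's list after num.toNat iterations equals B's map over the symmetric range
theorem main_eq (n : Nat) : negL n ++ 0 :: posL n
    = List.map fibAt ((List.range (2 * n + 1)).map (fun k : Nat => -(n : Int) + (k : Int))) := by
  rw [List.map_map]
  have hsplit : 2 * n + 1 = n + (n + 1) := by omega
  rw [hsplit, List.range_add, List.map_append, List.map_map]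
  congr 1
  · -- negative half
    rw [negL_eq]
    apply List.map_congr_left
    intro k hk
    simp only [Function.comp_apply]
    have hk' : k < n := List.mem_range.mp hk
    have hneg : ¬ (0 ≤ -(n : Int) + (k : Int)) := by omega
    rw [fibAt, if_neg hneg]
    have htn : (-(-(n : Int) + (k : Int))).toNat = n - k := by omega
    rw [htn, fibFD_eq]
    have hexp : n - k + 1 = (n - k - 1) + 2 := by omega
    rw [hexp, pow_add]
    norm_num
  · -- zero and positive half
    rw [posL_eq, List.range_succ_eq_map]
    simp only [List.map_cons, List.map_map]
    congr 1
    · simp only [Function.comp_apply]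
      have hz : -(n : Int) + ((n + 0 : Nat) : Int) = 0 := by push_cast; ring
      rw [hz]
      rw [fibAt, if_pos le_rfl, fibFD_eq]
      simp
    · apply List.map_congr_left
      intro a _
      show (Nat.fib (a + 1) : Int) = fibAt (-(n : Int) + ((n + a + 1 : Nat) : Int))

      have hpos : (0 : Int) ≤ -(n : Int) + ((n + a + 1 : Nat) : Int) := by push_cast; omega
      rw [fibAt, if_pos hpos]
      have : ((-(n : Int) + ((n + a + 1 : Nat) : Int))).toNat = a + 1 := by omega
      rw [this, fibFD_eq]

-- ===== VERDICT (by name: the statement is the Claim_ definition above) =====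
theorem fib_negative_spec : Claim_equal_fib_negative := by
  intro num _ hpre
  show fib_negative num = fib_negative_alt num
  obtain ⟨n, rfl⟩ : ∃ n : Nat, num = (n : Int) :=
    ⟨num.toNat, (Int.toNat_of_nonneg hpre).symm⟩
  unfold fib_negative fib_negative_alt
  rw [PySem.List.pyRange_one, PySem.List.pyRange_one]
  rw [List.foldl_map]
  have e1 : ((n : Int) - 0).toNat = n := by omega
  have e2 : (((n : Int) + 1) - (-(n : Int))).toNat = 2 * n + 1 := by omega
  rw [e1, e2]
  have e : ∀ k : Nat, ((0 : Int) + (k : Int)).toNat = k := by intro k; omega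
  simp only [e]
  rw [foldA_range n]
  show negL n ++ 0 :: posL n = _
  exact main_eq n
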